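-- pv_equiv track=rewrite | github.com/Vekteur/probabilistic-calibration-study | uq/analysis/plot_metrics_regul.py | get_unique_hparams
-- ===== SOURCE A (Python) =====
-- def get_unique_hparams(hparams_list):
--     from collections import defaultdict
--
--     count = defaultdict(set)
--     for hparams in hparams_list:
--         for hparam, value in hparams.items():
--             count[hparam].add(value)
--     unique_hparams = {}
--     variable_hparams = []
--     for hparam, values in count.items():
--         if len(values) == 1:
--             unique_hparams[hparam] = next(iter(values))
--         else:
--             variable_hparams.append(hparam)
--     return unique_hparams, variable_hparams
-- ===== SOURCE B (Python) =====
-- def get_unique_hparams(hparams_list):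
--     first = {}
--     variable = set()
--     for hparams in hparams_list:
--         for hparam, value in hparams.items():
--             if hparam not in first:
--                 first[hparam] = value
--             elif value != first[hparam]:
--                 variable.add(hparam)
--     unique_hparams = {}
--     variable_hparams = []
--     for hparam, value in first.items():
--         if hparam in variable:
--             variable_hparams.append(hparam)
--         else:
--             unique_hparams[hparam] = value
--     return unique_hparams, variable_hparams
-- ===== Notes on version B (the rewrite author's own statement) =====
-- stated objective: simpler
-- what changed: Instead of accumulating a full set of values per key and then classifying by set size, B keeps only the first-seen value per key plus a 'variable' flag set when a later differing value appears, then emits both outputs in one pass over the first-seen dict.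
import Mathlib
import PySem

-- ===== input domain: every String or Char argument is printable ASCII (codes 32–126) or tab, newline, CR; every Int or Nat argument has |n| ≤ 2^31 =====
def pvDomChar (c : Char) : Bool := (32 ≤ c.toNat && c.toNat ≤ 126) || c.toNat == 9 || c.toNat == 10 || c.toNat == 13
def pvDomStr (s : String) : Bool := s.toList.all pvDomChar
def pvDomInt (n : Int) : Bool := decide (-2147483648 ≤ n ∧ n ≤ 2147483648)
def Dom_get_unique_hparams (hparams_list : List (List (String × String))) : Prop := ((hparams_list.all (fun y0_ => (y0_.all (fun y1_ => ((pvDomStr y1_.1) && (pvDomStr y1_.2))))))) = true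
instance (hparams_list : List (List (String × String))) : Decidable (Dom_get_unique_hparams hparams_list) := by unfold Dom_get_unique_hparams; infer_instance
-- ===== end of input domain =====

-- B replaces A's per-key value-set accumulation by first-seen-value-plus-variable-flag state; equal return values, proved below.

-- ===== PORT A =====
-- count[hparam].add(value) on the defaultdict(set)
def pvAStep (d : PySem.Dict String (PySem.Set String)) (p : String × String) :
    PySem.Dict String (PySem.Set String) :=
  d.modify p.1 PySem.Set.empty (fun s => PySem.Set.add s p.2)

-- the body of A's second loop; next(iter(values)) is taken under the len(values)==1
-- guard, where the set has exactly one element, so it is that element (headD "")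
def pvACollect (acc : PySem.Dict String String × List String) (kv : String × PySem.Set String) :
    PySem.Dict String String × List String :=
  if PySem.Set.len kv.2 = 1 then (acc.1.insert kv.1 (kv.2.headD ""), acc.2)
  else (acc.1, acc.2 ++ [kv.1])

def get_unique_hparams (hparams_list : List (List (String × String))) : (List (String × String)) × List String :=
  let count := hparams_list.foldl (fun d hparams => hparams.foldl pvAStep d) PySem.Dict.empty
  let res := count.items.foldl pvACollect (PySem.Dict.empty, [])
  (res.1.items, res.2)

-- ===== PORT B =====
-- the body of B's first loop over (first, variable)
def pvBStep (st : PySem.Dict String String × PySem.Set String) (p : String × String) :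
    PySem.Dict String String × PySem.Set String :=
  if st.1.contains p.1 = false then (st.1.insert p.1 p.2, st.2)
  else if p.2 ≠ st.1.getD p.1 "" then (st.1, PySem.Set.add st.2 p.1)
  else st

-- the body of B's second loop
def pvBCollect (varset : PySem.Set String) (acc : PySem.Dict String String × List String)
    (kv : String × String) : PySem.Dict String String × List String :=
  if varset.contains kv.1 then (acc.1, acc.2 ++ [kv.1])
  else (acc.1.insert kv.1 kv.2, acc.2)

def get_unique_hparams_alt (hparams_list : List (List (String × String))) : (List (String × String)) × List String :=
  let st := hparams_list.foldl (fun st hparams => hparams.foldl pvBStep st)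
      (PySem.Dict.empty, PySem.Set.empty)
  let res := st.1.items.foldl (pvBCollect st.2) (PySem.Dict.empty, [])
  (res.1.items, res.2)

-- ===== PRECONDITION & SPEC =====
def Spec_get_unique_hparams (hparams_list : List (List (String × String))) (out : (List (String × String)) × List String) : Prop := out = get_unique_hparams_alt hparams_list
instance (hparams_list : List (List (String × String))) (out : (List (String × String)) × List String) : Decidable (Spec_get_unique_hparams hparams_list out) := by unfold Spec_get_unique_hparams; infer_instance

-- ===== CLAIM (what is proved, stated in full; the proofs are below) =====
def Claim_equal_get_unique_hparams : Prop := ∀ (hparams_list : List (List (String × String))), Dom_get_unique_hparams hparams_list → Spec_get_unique_hparams hparams_list (get_unique_hparams hparams_list)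

-- ===== LEMMAS AND PROOFS =====

-- the values recorded for key k, in order
def pvVals (k : String) (ps : List (String × String)) : List String :=
  (ps.filter (fun p => p.1 == k)).map (·.2)

-- whether B's first loop, started with first-dict f, ends with k flagged variable
def pvDiffB (f : PySem.Dict String String) (k : String) (l : List (String × String)) : Bool :=
  if f.contains k then (pvVals k l).any (fun w => w != f.getD k "")
  else ((pvVals k l).tail).any (fun w => w != (pvVals k l).headD "")

theorem pvVals_cons (k : String) (p : String × String) (l : List (String × String)) :
    pvVals k (p :: l) = if p.1 = k then p.2 :: pvVals k l else pvVals k l := by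
  simp [pvVals, List.filter_cons]
  split_ifs <;> simp_all

theorem A_getD (l : List (String × String)) :
    ∀ (d : PySem.Dict String (PySem.Set String)) (k : String),
    (l.foldl pvAStep d).getD k PySem.Set.empty
      = (pvVals k l).foldl PySem.Set.add (d.getD k PySem.Set.empty) := by
  induction l with
  | nil => intro d k; simp [pvVals]
  | cons p l ih =>
    intro d k
    simp only [List.foldl_cons, ih, pvVals_cons]
    by_cases h : p.1 = k
    · subst h
      simp [pvAStep]
    · simp [pvAStep, PySem.Dict.getD_modify, Ne.symm h, h]

theorem A_keys (l : List (String × String)) (d : PySem.Dict String (PySem.Set String)) :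
    (l.foldl pvAStep d).keys = PySem.Set.update d.keys (l.map (·.1)) := by
  exact PySem.Dict.keys_foldl_modify_key l (·.1) PySem.Set.empty
    (fun _ p s => PySem.Set.add s p.2) d

theorem set_contains_add (s : PySem.Set String) (x y : String) :
    (PySem.Set.add s x).contains y = (s.contains y || y == x) := by
  by_cases h : y ∈ s.add x
  · rw [PySem.Set.mem_add] at h
    rcases h with h | h
    · simp [PySem.Set.contains_iff, PySem.Set.mem_add, h]
    · simp [PySem.Set.contains_iff, PySem.Set.mem_add, h]
  · rw [PySem.Set.mem_add] at h
    rw [not_or] at h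
    have h1 : s.contains y = false := by
      simp [← Bool.not_eq_true, PySem.Set.contains_iff]; exact h.1
    have h2 : (PySem.Set.add s x).contains y = false := by
      simp [← Bool.not_eq_true, PySem.Set.contains_iff, PySem.Set.mem_add]; tauto
    simp [h1, h2, h.2]

theorem B_char (l : List (String × String)) :
    ∀ (f : PySem.Dict String String) (v : PySem.Set String),
    ((l.foldl pvBStep (f, v)).1.keys = PySem.Set.update f.keys (l.map (·.1)))
    ∧ (∀ k, (l.foldl pvBStep (f, v)).1.getD k ""
        = if f.contains k then f.getD k "" else (pvVals k l).headD "")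
    ∧ (∀ k, (l.foldl pvBStep (f, v)).2.contains k = (v.contains k || pvDiffB f k l)) := by
  induction l with
  | nil =>
    intro f v
    refine ⟨rfl, ?_, ?_⟩
    · intro k
      by_cases hc : f.contains k = true
      · simp [hc, pvVals]
      · simp [pvVals, PySem.Dict.getD_of_not_contains _ _ (by simpa using hc), hc]
    · intro k
      simp [pvDiffB, pvVals]
  | cons p l ih =>
    intro f v
    rw [List.foldl_cons]
    by_cases hc : f.contains p.1 = true
    · by_cases hne : p.2 ≠ f.getD p.1 ""
      · have hstep : pvBStep (f, v) p = (f, PySem.Set.add v p.1) := by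
          simp [pvBStep, hc, hne]
        rw [hstep]
        obtain ⟨ih1, ih2, ih3⟩ := ih f (PySem.Set.add v p.1)
        refine ⟨?_, ?_, ?_⟩
        · rw [ih1]
          have hadd : PySem.Set.add f.keys p.1 = f.keys := by
            simp [PySem.Set.add, PySem.Set.contains_iff,
              (PySem.Dict.contains_iff_mem_keys _ _).mp hc]
          simp [PySem.Set.update, hadd]
        · intro k
          rw [ih2 k]
          by_cases hk : k = p.1
          · subst hk; simp [hc]
          · rw [pvVals_cons, if_neg (Ne.symm hk)]
        · intro k
          rw [ih3 k, set_contains_add]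
          by_cases hk : k = p.1
          · subst hk
            have hd : pvDiffB f p.1 (p :: l) = true := by
              simp [pvDiffB, hc, pvVals_cons]
              exact Or.inl (by simpa using hne)
            rw [hd]
            cases v.contains p.1 <;> simp
          · rw [show pvDiffB f k (p :: l) = pvDiffB f k l from by
              simp [pvDiffB, pvVals_cons, if_neg (Ne.symm hk)]]
            have : (k == p.1) = false := by simpa using hk
            cases v.contains k <;> simp [this]
      · have heq : p.2 = f.getD p.1 "" := by simpa using hne
        have hstep : pvBStep (f, v) p = (f, v) := by
          simp [pvBStep, hc, heq]
        rw [hstep]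
        obtain ⟨ih1, ih2, ih3⟩ := ih f v
        refine ⟨?_, ?_, ?_⟩
        · rw [ih1]
          have hadd : PySem.Set.add f.keys p.1 = f.keys := by
            simp [PySem.Set.add, PySem.Set.contains_iff,
              (PySem.Dict.contains_iff_mem_keys _ _).mp hc]
          simp [PySem.Set.update, hadd]
        · intro k
          rw [ih2 k]
          by_cases hk : k = p.1
          · subst hk; simp [hc]
          · rw [pvVals_cons, if_neg (Ne.symm hk)]
        · intro k
          rw [ih3 k]
          by_cases hk : k = p.1
          · subst hk
            rw [show pvDiffB f p.1 (p :: l) = pvDiffB f p.1 l from by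
              simp [pvDiffB, hc, pvVals_cons, ← heq]]
          · rw [show pvDiffB f k (p :: l) = pvDiffB f k l from by
              simp [pvDiffB, pvVals_cons, if_neg (Ne.symm hk)]]
    · have hc' : f.contains p.1 = false := by simpa using hc
      have hstep : pvBStep (f, v) p = (f.insert p.1 p.2, v) := by
        simp [pvBStep, hc']
      rw [hstep]
      obtain ⟨ih1, ih2, ih3⟩ := ih (f.insert p.1 p.2) v
      refine ⟨?_, ?_, ?_⟩
      · rw [ih1, PySem.Dict.keys_insert_of_not_contains f p.2 hc']
        have hadd : PySem.Set.add f.keys p.1 = f.keys ++ [p.1] := by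
          have : p.1 ∉ f.keys := fun hmem =>
            absurd ((PySem.Dict.contains_iff_mem_keys _ _).mpr hmem) (by simp [hc'])
          simp [PySem.Set.add, PySem.Set.contains_iff, this]
        simp [PySem.Set.update, hadd]
      · intro k
        rw [ih2 k]
        by_cases hk : k = p.1
        · subst hk
          rw [pvVals_cons, if_pos rfl]
          simp [PySem.Dict.contains_insert, PySem.Dict.getD_insert, hc']
        · rw [pvVals_cons, if_neg (Ne.symm hk)]
          have : (k == p.1) = false := by simpa using hk
          simp [PySem.Dict.contains_insert, PySem.Dict.getD_insert, hk, this]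
      · intro k
        rw [ih3 k]
        by_cases hk : k = p.1
        · subst hk
          rw [show pvDiffB (f.insert p.1 p.2) p.1 l = pvDiffB f p.1 (p :: l) from by
            simp [pvDiffB, hc', pvVals_cons, PySem.Dict.contains_insert,
              PySem.Dict.getD_insert]]
        · have hbe : (k == p.1) = false := by simpa using hk
          rw [show pvDiffB (f.insert p.1 p.2) k l = pvDiffB f k (p :: l) from by
            simp [pvDiffB, pvVals_cons, if_neg (Ne.symm hk), hbe,
              PySem.Dict.contains_insert, PySem.Dict.getD_insert, hk]]

theorem foldl_add_headD (l : List String) :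
    ∀ (s : PySem.Set String), s ≠ [] → (l.foldl PySem.Set.add s).headD "" = s.headD "" := by
  induction l with
  | nil => intro s _; rfl
  | cons x l ih =>
    intro s hs
    rw [List.foldl_cons]
    by_cases h : x ∈ s
    · rw [show PySem.Set.add s x = s from by simp [PySem.Set.add, PySem.Set.contains_iff, h]]
      exact ih s hs
    · rw [show PySem.Set.add s x = s ++ [x] from by simp [PySem.Set.add, PySem.Set.contains_iff, h]]
      rw [ih _ (by simp)]
      cases s with
      | nil => exact absurd rfl hs
      | cons a t => simp

theorem foldl_add_const (v : String) (rest : List String) (h : ∀ w ∈ rest, w = v) :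
    rest.foldl PySem.Set.add [v] = [v] := by
  induction rest with
  | nil => rfl
  | cons w rest ih =>
    rw [List.foldl_cons,
      show PySem.Set.add [v] w = [v] from by
        simp [PySem.Set.add, PySem.Set.contains_iff, h w (by simp)]]
    exact ih (fun u hu => h u (by simp [hu]))

theorem add_nil (v : String) : PySem.Set.add [] v = [v] := by
  have : v ∉ ([] : List String) := by simp
  simp [PySem.Set.add, PySem.Set.contains_iff, this]

theorem ofList_len_one_iff (v : String) (rest : List String) :
    (PySem.Set.ofList (v :: rest)).length = 1 ↔ ∀ w ∈ rest, w = v := by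
  constructor
  · intro h w hw
    obtain ⟨x, hx⟩ := List.length_eq_one_iff.mp h
    have hv : v ∈ PySem.Set.ofList (v :: rest) :=
      (PySem.Set.mem_ofList _ _).mpr (by simp)
    have hwm : w ∈ PySem.Set.ofList (v :: rest) :=
      (PySem.Set.mem_ofList _ _).mpr (by simp [hw])
    rw [hx] at hv hwm
    simp at hv hwm
    rw [hwm, hv]
  · intro h
    rw [PySem.Set.ofList_eq_foldl, List.foldl_cons, add_nil, foldl_add_const v rest h]
    rfl

theorem ofList_head (v : String) (rest : List String) :
    (PySem.Set.ofList (v :: rest)).headD "" = v := by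
  rw [PySem.Set.ofList_eq_foldl, List.foldl_cons, add_nil]
  exact foldl_add_headD rest [v] (by simp)

theorem final_fold (ps : List (String × String)) (varset : PySem.Set String)
    (hvar : ∀ k, varset.contains k
      = ((pvVals k ps).tail).any (fun w => w != (pvVals k ps).headD "")) :
    ∀ (K : List String), (∀ k ∈ K, pvVals k ps ≠ []) →
    ∀ (acc : PySem.Dict String String × List String),
    (K.map (fun k => (k, PySem.Set.ofList (pvVals k ps)))).foldl pvACollect acc
      = (K.map (fun k => (k, (pvVals k ps).headD ""))).foldl (pvBCollect varset) acc := by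
  intro K
  induction K with
  | nil => intro _ acc; rfl
  | cons k K ih =>
    intro hne acc
    rw [List.map_cons, List.map_cons, List.foldl_cons, List.foldl_cons]
    have hstep : pvACollect acc (k, PySem.Set.ofList (pvVals k ps))
        = pvBCollect varset acc (k, (pvVals k ps).headD "") := by
      obtain ⟨v, rest, hv⟩ : ∃ v rest, pvVals k ps = v :: rest := by
        cases h : pvVals k ps with
        | nil => exact absurd h (hne k (by simp))
        | cons a t => exact ⟨a, t, rfl⟩
      rw [hv]
      by_cases hone : ∀ w ∈ rest, w = v
      · have hlen : (PySem.Set.ofList (v :: rest)).length = 1 :=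
          (ofList_len_one_iff v rest).mpr hone
        have hvarf : varset.contains k = false := by
          rw [hvar k, hv]
          simp
          exact fun w hw => hone w hw
        have hmem : k ∉ varset := fun hm => by
          have h2 := (PySem.Set.contains_iff varset k).mpr hm
          rw [hvarf] at h2
          exact Bool.false_ne_true h2
        have hh : (List.head? (PySem.Set.ofList (v :: rest))).getD "" = v := by
          simpa using ofList_head v rest
        simp [pvACollect, pvBCollect, PySem.Set.len, hlen, hvarf, hmem, hh]
      · obtain ⟨w, hw, hwne⟩ : ∃ w ∈ rest, w ≠ v := by
          simpa using hone
        have hlen : (PySem.Set.ofList (v :: rest)).length ≠ 1 := fun hl =>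
          hwne ((ofList_len_one_iff v rest).mp hl w hw)
        have hvart : varset.contains k = true := by
          rw [hvar k, hv]
          simp
          exact ⟨w, hw, hwne⟩
        have hmem : k ∈ varset := (PySem.Set.contains_iff varset k).mp hvart
        simp [pvACollect, pvBCollect, PySem.Set.len, hlen, hvart, hmem]
    rw [hstep]
    exact ih (fun j hj => hne j (by simp [hj])) _

theorem empty_set_contains (k : String) :
    PySem.Set.contains (PySem.Set.empty : PySem.Set String) k = false := by
  by_cases h : PySem.Set.contains (PySem.Set.empty : PySem.Set String) k = true
  · exact absurd ((PySem.Set.contains_iff _ _).mp h) (by simp [PySem.Set.empty])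
  · simpa using h

theorem ports_eq (hl : List (List (String × String))) :
    get_unique_hparams hl = get_unique_hparams_alt hl := by
  unfold get_unique_hparams get_unique_hparams_alt
  rw [← List.foldl_flatten (f := pvAStep) (b := PySem.Dict.empty) (L := hl),
      ← List.foldl_flatten (f := pvBStep) (b := (PySem.Dict.empty, PySem.Set.empty)) (L := hl)]
  set ps := hl.flatten with hps
  set K := PySem.Set.ofList (ps.map (·.1)) with hK
  have hKnodup : K.Nodup := PySem.Set.nodup_ofList _
  have hkeysA : (ps.foldl pvAStep PySem.Dict.empty).keys = K := by
    rw [A_keys]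
    simp only [PySem.Dict.keys_empty, PySem.Set.update_nil_left]
    exact hK.symm
  have hitemsA : (ps.foldl pvAStep PySem.Dict.empty).items
      = K.map (fun k => (k, PySem.Set.ofList (pvVals k ps))) := by
    rw [PySem.Dict.items_eq_map_keys _ (by rw [hkeysA]; exact hKnodup) PySem.Set.empty,
      hkeysA]
    refine List.map_congr_left ?_
    intro k _
    rw [A_getD]
    simp [PySem.Set.ofList_eq_foldl]
  obtain ⟨hBkeys, hBgetD, hBvar⟩ := B_char ps PySem.Dict.empty PySem.Set.empty
  have hkeysB : (ps.foldl pvBStep (PySem.Dict.empty, PySem.Set.empty)).1.keys = K := by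
    rw [hBkeys]
    simp only [PySem.Dict.keys_empty, PySem.Set.update_nil_left]
    exact hK.symm
  have hitemsB : (ps.foldl pvBStep (PySem.Dict.empty, PySem.Set.empty)).1.items
      = K.map (fun k => (k, (pvVals k ps).headD "")) := by
    rw [PySem.Dict.items_eq_map_keys _ (by rw [hkeysB]; exact hKnodup) "", hkeysB]
    refine List.map_congr_left ?_
    intro k _
    rw [hBgetD k]
    simp
  have hvar : ∀ k, (ps.foldl pvBStep (PySem.Dict.empty, PySem.Set.empty)).2.contains k
      = ((pvVals k ps).tail).any (fun w => w != (pvVals k ps).headD "") := by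
    intro k
    rw [hBvar k, empty_set_contains]
    simp [pvDiffB]
  have hnonempty : ∀ k ∈ K, pvVals k ps ≠ [] := by
    intro k hk hnil
    rw [hK, PySem.Set.mem_ofList] at hk
    obtain ⟨p, hp, hp1⟩ := List.mem_map.mp hk
    have hm : p.2 ∈ pvVals k ps := by
      simp only [pvVals, List.mem_map]
      exact ⟨p, List.mem_filter.mpr ⟨hp, by simp [hp1]⟩, rfl⟩
    rw [hnil] at hm
    exact absurd hm (List.not_mem_nil)
  change ((List.foldl pvACollect (PySem.Dict.empty, ([] : List String))
        (List.foldl pvAStep PySem.Dict.empty ps).items).1.items,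
      (List.foldl pvACollect (PySem.Dict.empty, ([] : List String))
        (List.foldl pvAStep PySem.Dict.empty ps).items).2)
    = ((List.foldl (pvBCollect (List.foldl pvBStep (PySem.Dict.empty, PySem.Set.empty) ps).2)
        (PySem.Dict.empty, ([] : List String))
        (List.foldl pvBStep (PySem.Dict.empty, PySem.Set.empty) ps).1.items).1.items,
      (List.foldl (pvBCollect (List.foldl pvBStep (PySem.Dict.empty, PySem.Set.empty) ps).2)
        (PySem.Dict.empty, ([] : List String))
        (List.foldl pvBStep (PySem.Dict.empty, PySem.Set.empty) ps).1.items).2)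
  rw [hitemsA, hitemsB, final_fold ps _ hvar K hnonempty]

-- ===== VERDICT (by name: the statement is the Claim_ definition above) =====
theorem get_unique_hparams_spec : Claim_equal_get_unique_hparams := by
  intro hl _
  unfold Spec_get_unique_hparams
  exact ports_eq hl
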